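-- pv_equiv track=rewrite | github.com/doshirush1901/ira-v3 | src/ira/brain/imports_intents.py | infer_document_role
-- ===== SOURCE A (Python) =====
-- def infer_document_role(intent_tags: list[str]) -> str:
--     """Pick a single best document role from intent tags."""
--     if not intent_tags:
--         return "other"
--     priority = [
--         "quote_customer",
--         "quote_vendor",
--         "rfq_customer",
--         "rfq_vendor",
--         "part_detail",
--         "bom",
--         "drawing",
--         "spec_sheet",
--         "presentation_technical",
--         "presentation_sales",
--         "invoice_customer",
--         "invoice_vendor",
--         "po_customer",
--         "po_vendor",
--         "contract_customer",
--         "contract_vendor",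
--         "nda",
--         "project_update",
--         "installation_report",
--         "service_report",
--         "lead_list",
--         "customer_profile",
--         "vendor_profile",
--     ]
--     for role in priority:
--         if role in intent_tags:
--             return role
--     return intent_tags[0]
-- ===== SOURCE B (Python) =====
-- _PRIORITY = [
--     "quote_customer",
--     "quote_vendor",
--     "rfq_customer",
--     "rfq_vendor",
--     "part_detail",
--     "bom",
--     "drawing",
--     "spec_sheet",
--     "presentation_technical",
--     "presentation_sales",
--     "invoice_customer",
--     "invoice_vendor",
--     "po_customer",
--     "po_vendor",
--     "contract_customer",
--     "contract_vendor",
--     "nda",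
--     "project_update",
--     "installation_report",
--     "service_report",
--     "lead_list",
--     "customer_profile",
--     "vendor_profile",
-- ]
--
--
-- def infer_document_role(intent_tags: list[str]) -> str:
--     """Pick a single best document role from intent tags."""
--     if not intent_tags:
--         return "other"
--     rank = {role: i for i, role in enumerate(_PRIORITY)}
--     best = None
--     for tag in intent_tags:
--         r = rank.get(tag)
--         if r is not None and (best is None or r < best[0]):
--             best = (r, tag)
--     return best[1] if best is not None else intent_tags[0]
-- ===== Notes on version B (the rewrite author's own statement) =====
-- stated objective: faster
-- what changed: Instead of scanning the fixed priority list and testing each role for membership in the tags (a nested scan), B builds a role->rank table once and makes a single min-rank pass over the tags; the inner membership scan disappears.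
import Mathlib
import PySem

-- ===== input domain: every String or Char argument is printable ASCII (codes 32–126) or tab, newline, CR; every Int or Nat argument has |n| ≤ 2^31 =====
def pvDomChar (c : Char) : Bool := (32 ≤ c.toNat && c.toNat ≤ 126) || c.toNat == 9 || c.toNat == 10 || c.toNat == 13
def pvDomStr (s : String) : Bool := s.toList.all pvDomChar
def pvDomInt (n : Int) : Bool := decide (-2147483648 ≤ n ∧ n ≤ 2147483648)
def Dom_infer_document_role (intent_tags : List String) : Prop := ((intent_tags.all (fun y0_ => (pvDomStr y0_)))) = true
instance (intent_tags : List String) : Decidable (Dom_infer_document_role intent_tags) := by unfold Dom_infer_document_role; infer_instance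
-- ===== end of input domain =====

-- B replaces A's scan of the priority list (membership test per role) by a role->rank
-- table built once and a single min-rank pass over the tags (measured faster in a timing run).

-- ===== PORT A =====
-- the module-level priority list (shared data of both versions)
def pvPriority : List String :=
  ["quote_customer", "quote_vendor", "rfq_customer", "rfq_vendor", "part_detail",
   "bom", "drawing", "spec_sheet", "presentation_technical", "presentation_sales",
   "invoice_customer", "invoice_vendor", "po_customer", "po_vendor",
   "contract_customer", "contract_vendor", "nda", "project_update",
   "installation_report", "service_report", "lead_list", "customer_profile",
   "vendor_profile"]

-- 'for role in priority: if role in intent_tags: return role' = find? over the list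
def infer_document_role (intent_tags : List String) : String :=
  match intent_tags with
  | [] => "other"
  | t0 :: _ =>
    match pvPriority.find? (fun role => intent_tags.contains role) with
    | some role => role
    | none => t0

-- ===== PORT B =====
-- rank = {role: i for i, role in enumerate(_PRIORITY)}
def pvRank : PySem.Dict String Int :=
  PySem.Dict.ofList ((PySem.List.enumerate pvPriority).map (fun p => (p.2, p.1)))

-- the loop body: keep (rank, tag) of the strictly smallest rank seen so far
def pvStep (best : Option (Int × String)) (tag : String) : Option (Int × String) :=
  match pvRank.get? tag with
  | none => best
  | some r =>
    match best with
    | none => some (r, tag)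
    | some b => if r < b.1 then some (r, tag) else best

def infer_document_role_alt (intent_tags : List String) : String :=
  match intent_tags with
  | [] => "other"
  | t0 :: _ =>
    match intent_tags.foldl pvStep none with
    | some b => b.2
    | none => t0

-- ===== PRECONDITION & SPEC =====
def Spec_infer_document_role (intent_tags : List String) (out : String) : Prop := out = infer_document_role_alt intent_tags
instance (intent_tags : List String) (out : String) : Decidable (Spec_infer_document_role intent_tags out) := by unfold Spec_infer_document_role; infer_instance

-- ===== CLAIM (what is proved, stated in full; the proofs are below) =====
def Claim_equal_infer_document_role : Prop := ∀ (intent_tags : List String), Dom_infer_document_role intent_tags → Spec_infer_document_role intent_tags (infer_document_role intent_tags)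

-- ===== LEMMAS AND PROOFS =====

-- pvRank is the literal association list of (role, index) pairs
lemma pvRank_mk : pvRank = PySem.Dict.mk ((PySem.List.enumerate pvPriority).map (fun p => (p.2, p.1))) := by
  decide

-- get? on a literal dict is first-match association lookup
lemma get?_mk_assoc (pairs : List (String × Int)) (t : String) :
    (PySem.Dict.mk pairs).get? t = (pairs.find? (fun p => p.1 == t)).map (·.2) := by
  induction pairs with
  | nil => rfl
  | cons p ps ih =>
    rw [show (p :: ps) = ((p.1, p.2) :: ps) from rfl, PySem.Dict.get?_mk_cons, List.find?_cons]
    by_cases h : p.1 == t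
    · simp [h]
    · simp only [Bool.not_eq_true] at h
      simp [h, ih]

-- association lookup in the swapped enumeration is idxOf?
lemma find?_enum_swap (P : List String) (s : Int) (t : String) :
    ((PySem.List.enumerate P s).map (fun p => (p.2, p.1))).find? (fun p => p.1 == t)
      = (List.idxOf? t P).map (fun i : Nat => (t, s + (i : Int))) := by
  induction P generalizing s with
  | nil => rfl
  | cons q Q ih =>
    rw [PySem.List.enumerate_cons]
    by_cases h : q = t
    · subst h; simp [List.idxOf?_cons]
    · have hb : (q == t) = false := by simp [h]
      rw [List.map_cons, List.find?_cons]
      simp only [hb]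
      rw [ih (s + 1), List.idxOf?_cons]
      simp only [hb, Bool.false_eq_true, if_false]
      cases List.idxOf? t Q with
      | none => rfl
      | some i =>
        simp only [Option.map_some, Option.some.injEq, Prod.mk.injEq, true_and]
        push_cast
        ring

-- the rank table is exactly idxOf? in the priority list
lemma rank_get (t : String) :
    pvRank.get? t = (List.idxOf? t pvPriority).map (fun i : Nat => (i : Int)) := by
  rw [pvRank_mk, get?_mk_assoc, find?_enum_swap]
  cases List.idxOf? t pvPriority <;> simp

-- the fold returns none iff it starts at none and no tag is in the table
lemma loop_none_iff (ts : List String) (acc : Option (Int × String)) :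
    ts.foldl pvStep acc = none ↔ (acc = none ∧ ∀ t ∈ ts, pvRank.get? t = none) := by
  induction ts generalizing acc with
  | nil => simp
  | cons t ts ih =>
    rw [List.foldl_cons, ih]
    constructor
    · rintro ⟨h1, h2⟩
      unfold pvStep at h1
      cases hg : pvRank.get? t with
      | none => simp only [hg] at h1; exact ⟨h1, by simpa [hg] using h2⟩
      | some r =>
        exfalso
        cases acc with
        | none => simp [hg] at h1
        | some b => simp only [hg] at h1; split at h1 <;> simp_all
    · rintro ⟨h1, h2⟩
      subst h1
      have hg : pvRank.get? t = none := h2 t (by simp)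
      exact ⟨by simp [pvStep, hg], fun u hu => h2 u (by simp [hu])⟩

-- if the fold returns some (r, s), then s came from acc or from the list with rank r
lemma loop_some_mem (ts : List String) (acc : Option (Int × String)) (r : Int) (s : String)
    (h : ts.foldl pvStep acc = some (r, s)) :
    acc = some (r, s) ∨ (s ∈ ts ∧ pvRank.get? s = some r) := by
  induction ts generalizing acc with
  | nil => exact Or.inl (by simpa using h)
  | cons t ts ih =>
    rw [List.foldl_cons] at h
    rcases ih _ h with h' | h'
    · unfold pvStep at h'
      cases hg : pvRank.get? t with
      | none => rw [hg] at h'; exact Or.inl h'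
      | some v =>
        rw [hg] at h'
        cases acc with
        | none =>
          obtain ⟨rfl, rfl⟩ : v = r ∧ t = s := by simpa using h'
          exact Or.inr ⟨by simp, by rw [hg]⟩
        | some b =>
          have h2 : (if v < b.1 then some (v, t) else some b) = some (r, s) := h'
          by_cases hlt : v < b.1
          · rw [if_pos hlt] at h2
            obtain ⟨rfl, rfl⟩ : v = r ∧ t = s := by simpa using h2
            exact Or.inr ⟨by simp, by rw [hg]⟩
          · rw [if_neg hlt] at h2
            exact Or.inl h2
    · exact Or.inr ⟨by simp [h'.1], h'.2⟩

-- the returned rank is minimal among acc and all ranked tags of the list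
lemma loop_some_min (ts : List String) (acc : Option (Int × String)) (r : Int) (s : String)
    (h : ts.foldl pvStep acc = some (r, s)) :
    (∀ t ∈ ts, ∀ j, pvRank.get? t = some j → r ≤ j) ∧ (∀ b, acc = some b → r ≤ b.1) := by
  induction ts generalizing acc with
  | nil =>
    refine ⟨by simp, fun b hb => ?_⟩
    simp only [List.foldl_nil] at h; rw [h] at hb
    obtain ⟨rfl, rfl⟩ : r = b.1 ∧ s = b.2 := by
      have := Option.some.inj hb; exact ⟨congrArg Prod.fst this, congrArg Prod.snd this⟩
    rfl
  | cons t ts ih =>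
    rw [List.foldl_cons] at h
    obtain ⟨hmem, hacc⟩ := ih _ h
    have hstep : ∀ b', pvStep acc t = some b' → r ≤ b'.1 := hacc
    constructor
    · intro u hu j hj
      rcases List.mem_cons.mp hu with h' | h'
      · subst h'
        unfold pvStep at hstep
        rw [hj] at hstep
        cases acc with
        | none => simpa using hstep (j, u) rfl
        | some b =>
          by_cases hlt : j < b.1
          · simpa [hlt] using hstep (j, u) (by simp [hlt])
          · have hrb : r ≤ b.1 := by simpa [hlt] using hstep b (by simp [hlt])
            omega
      · exact hmem u h' j hj
    · intro b hb
      subst hb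
      unfold pvStep at hstep
      cases hg : pvRank.get? t with
      | none => rw [hg] at hstep; exact hstep b rfl
      | some v =>
        rw [hg] at hstep
        by_cases hlt : v < b.1
        · have hrv : r ≤ v := by simpa [hlt] using hstep (v, t) (by simp [hlt])
          omega
        · simpa [hlt] using hstep b (by simp [hlt])

-- membership in the priority list gives a rank, and a rank gives membership at that index
lemma rank_some_of_mem {t : String} (h : t ∈ pvPriority) : ∃ j, pvRank.get? t = some j := by
  rw [rank_get]
  cases hi : List.idxOf? t pvPriority with
  | none => exact absurd (List.idxOf?_eq_none_iff.mp hi) (by simpa using h)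
  | some i => exact ⟨i, by simp⟩

-- ===== VERDICT (by name: the statement is the Claim_ definition above) =====
theorem infer_document_role_spec : Claim_equal_infer_document_role := by
  intro ts _
  unfold Spec_infer_document_role infer_document_role infer_document_role_alt
  cases ts with
  | nil => rfl
  | cons t0 rest =>
    set ts := t0 :: rest with hts
    cases hf : pvPriority.find? (fun role => ts.contains role) with
    | none =>
      have hnone : ts.foldl pvStep none = none := by
        rw [loop_none_iff]
        refine ⟨rfl, fun t ht => ?_⟩
        rw [rank_get]
        cases hi : List.idxOf? t pvPriority with
        | none => simp
        | some i =>
          exfalso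
          obtain ⟨hlt, hget, -⟩ := List.idxOf?_eq_some_iff.mp hi
          have hmem : t ∈ pvPriority := hget ▸ List.getElem_mem hlt
          have := List.find?_eq_none.mp hf t hmem
          simp [ht] at this
      rw [hnone]
    | some p =>
      obtain ⟨hp, i, hi, hPi, hmin⟩ := List.find?_eq_some_iff_getElem.mp hf
      have hpts : p ∈ ts := by simpa using hp
      have hpP : p ∈ pvPriority := hPi ▸ List.getElem_mem hi
      cases hfold : ts.foldl pvStep none with
      | none =>
        exfalso
        obtain ⟨-, hall⟩ := (loop_none_iff ts none).mp hfold
        obtain ⟨j, hj⟩ := rank_some_of_mem hpP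
        rw [hall p hpts] at hj; simp at hj
      | some b =>
        obtain ⟨r, s⟩ := b
        rcases loop_some_mem ts none r s hfold with h' | ⟨hsts, hrs⟩
        · simp at h'
        -- s has rank r = idxOf? s, with P[k] = s
        have hks := hrs
        rw [rank_get] at hks
        cases hk : List.idxOf? s pvPriority with
        | none => rw [hk] at hks; simp at hks
        | some k =>
          rw [hk] at hks
          have hrk : r = (k : Int) := by simpa using hks.symm
          obtain ⟨hkl, hPk, -⟩ := List.idxOf?_eq_some_iff.mp hk
          -- rank of p: first index ip with P[ip] = p, ip ≤ i
          cases hip : List.idxOf? p pvPriority with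
          | none => exact absurd (List.idxOf?_eq_none_iff.mp hip) (by simpa using hpP)
          | some ip =>
            obtain ⟨hipl, hPip, hipfirst⟩ := List.idxOf?_eq_some_iff.mp hip
            have hipi : ip ≤ i := by
              by_contra hc
              exact hipfirst i (by omega) hPi
            -- minimality of the fold: r ≤ ip
            have hrip : r ≤ (ip : Int) := by
              have := (loop_some_min ts none r s hfold).1 p hpts (ip : Int)
                (by rw [rank_get, hip]; rfl)
              exact this
            -- find? minimality: k ≥ i (since P[k] = s ∈ ts)
            have hik : i ≤ k := by
              by_contra hc
              have := hmin k (by omega)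
              rw [hPk] at this
              simp [hsts] at this
            have hki : k = i := by omega
            have : s = p := by rw [← hPk, ← hPi]; simp [hki]
            simp [this]
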